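-- pv_equiv track=rewrite | github.com/LIAAD/Text2StoryPackage | text2story/brat2viz/drs2viz/viz.py | process_edge_labels
-- ===== SOURCE A (Python) =====
-- def process_edge_labels(edge_labels):
--     """
--     It process edge labels to find if there are more than one label per node, then
--     join the labels in one label
--
--     @param edge_labels: a dictionary that contains (tuple):string as a map for edges and their labels.
--     @return: Dict
--     """
--     new_edge_labels = {}
--
--     for edge in edge_labels:
--         n0 = edge[0]
--         n1 = edge[1]
--
--         if (n0, n1) in new_edge_labels:
--             new_edge_labels[(n0, n1)] = new_edge_labels[(n0, n1)] + " |\n " + edge_labels[edge]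
--         else:
--             new_edge_labels[(n0, n1)] = edge_labels[edge]
--
--     return new_edge_labels
-- ===== SOURCE B (Python) =====
-- def process_edge_labels(edge_labels):
--     groups = {}
--     for edge in edge_labels:
--         groups.setdefault((edge[0], edge[1]), []).append(edge_labels[edge])
--     return {pair: " |\n ".join(labels) for pair, labels in groups.items()}
-- ===== Notes on version B (the rewrite author's own statement) =====
-- stated objective: idiomatic
-- what changed: B separates grouping from formatting: one setdefault pass collects each pair's labels in a list (no membership test / else branch, no repeated string concatenation), then a dict comprehension joins each list once with ' |\n '.
import Mathlib
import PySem

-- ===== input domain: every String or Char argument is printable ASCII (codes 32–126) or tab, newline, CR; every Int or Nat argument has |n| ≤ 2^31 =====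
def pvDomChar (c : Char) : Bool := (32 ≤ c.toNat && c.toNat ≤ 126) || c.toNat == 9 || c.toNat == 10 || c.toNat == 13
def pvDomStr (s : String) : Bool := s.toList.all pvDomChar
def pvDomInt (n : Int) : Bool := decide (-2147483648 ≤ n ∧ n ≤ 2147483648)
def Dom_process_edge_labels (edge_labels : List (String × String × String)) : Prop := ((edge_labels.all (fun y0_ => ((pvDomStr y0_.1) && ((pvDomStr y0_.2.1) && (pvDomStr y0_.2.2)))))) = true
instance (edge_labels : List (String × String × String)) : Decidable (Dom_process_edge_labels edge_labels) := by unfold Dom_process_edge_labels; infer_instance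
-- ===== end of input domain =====

-- B groups each pair's labels into a list in one setdefault pass, then joins each list once — same result, more idiomatic decomposition (no claim of speed).


-- ===== PORT A =====
-- the input dict is the association list: each entry is ((n0, n1) ↦ label); 'edge_labels[edge]' inside
-- 'for edge in edge_labels' is the current item's own value (dict keys are unique), ported as edge.2.2
def process_edge_labels (edge_labels : List (String × String × String)) : List (String × String × String) :=
  let new_edge_labels : PySem.Dict (String × String) String :=
    edge_labels.foldl (fun acc edge =>
      let n0 := edge.1
      let n1 := edge.2.1
      if acc.contains (n0, n1) then
        acc.insert (n0, n1) (acc.getD (n0, n1) "" ++ " |\n " ++ edge.2.2)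
      else
        acc.insert (n0, n1) edge.2.2) PySem.Dict.empty
  new_edge_labels.items.map (fun p => (p.1.1, p.1.2, p.2))

-- ===== PORT B =====
-- groups.setdefault(k, []).append(v) ported as Dict.modify k [] (· ++ [v]) (i.e. groups[k] = groups.get(k, []) + [v]) — exact for the dict contents
def process_edge_labels_alt (edge_labels : List (String × String × String)) : List (String × String × String) :=
  let groups : PySem.Dict (String × String) (List String) :=
    edge_labels.foldl (fun d edge => d.modify (edge.1, edge.2.1) [] (· ++ [edge.2.2])) PySem.Dict.empty
  groups.items.map (fun p => (p.1.1, p.1.2, PySem.Str.join " |\n " p.2))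

-- ===== PRECONDITION & SPEC =====
def Spec_process_edge_labels (edge_labels : List (String × String × String)) (out : List (String × String × String)) : Prop := out = process_edge_labels_alt edge_labels
instance (edge_labels : List (String × String × String)) (out : List (String × String × String)) : Decidable (Spec_process_edge_labels edge_labels out) := by unfold Spec_process_edge_labels; infer_instance

-- ===== CLAIM (what is proved, stated in full; the proofs are below) =====
def Claim_equal_process_edge_labels : Prop := ∀ (edge_labels : List (String × String × String)), Dom_process_edge_labels edge_labels → Spec_process_edge_labels edge_labels (process_edge_labels edge_labels)

-- ===== LEMMAS AND PROOFS =====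

-- join over lists of chars: appending one more part
lemma chars_join_append_singleton (sep x : List Char) (l : List (List Char)) (h : l ≠ []) :
    PySem.Chars.join sep (l ++ [x]) = PySem.Chars.join sep l ++ sep ++ x := by
  induction l with
  | nil => exact absurd rfl h
  | cons a t ih =>
    cases t with
    | nil => simp [PySem.Chars.join_singleton, PySem.Chars.join_cons_cons]
    | cons b t2 =>
      have hih := ih (by simp)
      simp only [List.cons_append] at hih ⊢
      rw [PySem.Chars.join_cons_cons, PySem.Chars.join_cons_cons, hih]
      simp [List.append_assoc]

lemma str_join_singleton (sep v : String) : PySem.Str.join sep [v] = v := by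
  simp [PySem.Str.join, PySem.Chars.join_singleton]

lemma str_join_append_singleton (sep v : String) (l : List String) (h : l ≠ []) :
    PySem.Str.join sep (l ++ [v]) = PySem.Str.join sep l ++ sep ++ v := by
  simp only [PySem.Str.join, List.map_append, List.map_cons, List.map_nil]
  rw [chars_join_append_singleton _ _ _ (by simpa using h)]
  simp [String.ofList_append, String.ofList_toList, String.append_assoc]

-- lookups through an item-wise value map
lemma get?_map_val {κ ν μ : Type} [BEq κ] (f : ν → μ) (db : PySem.Dict κ ν) (da : PySem.Dict κ μ)
    (h : da.items = db.items.map (fun p => (p.1, f p.2))) (k : κ) :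
    da.get? k = (db.get? k).map f := by
  obtain ⟨la⟩ := da
  obtain ⟨lb⟩ := db
  replace h : la = lb.map (fun p => (p.1, f p.2)) := h
  subst h
  induction lb with
  | nil => rfl
  | cons p t ih =>
    obtain ⟨pk, pv⟩ := p
    simp only [List.map_cons, PySem.Dict.get?_mk_cons]
    by_cases hk : (pk == k) = true
    · simp [hk]
    · simp [hk, ih]

lemma contains_map_val {κ ν μ : Type} [BEq κ] (f : ν → μ) (db : PySem.Dict κ ν) (da : PySem.Dict κ μ)
    (h : da.items = db.items.map (fun p => (p.1, f p.2))) (k : κ) :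
    da.contains k = db.contains k := by
  rw [PySem.Dict.contains_eq_isSome_get?, PySem.Dict.contains_eq_isSome_get?, get?_map_val f db da h k]
  cases db.get? k <;> rfl

-- the loop invariant: A's dict is B's dict with each (nonempty) label list joined
lemma loop_rel (l : List (String × String × String)) :
    ∀ (da : PySem.Dict (String × String) String) (db : PySem.Dict (String × String) (List String)),
    da.items = db.items.map (fun p => (p.1, PySem.Str.join " |\n " p.2)) →
    (∀ p ∈ db.items, p.2 ≠ []) →
    (l.foldl (fun acc edge =>
        let n0 := edge.1
        let n1 := edge.2.1
        if acc.contains (n0, n1) then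
          acc.insert (n0, n1) (acc.getD (n0, n1) "" ++ " |\n " ++ edge.2.2)
        else
          acc.insert (n0, n1) edge.2.2) da).items =
      (l.foldl (fun d edge => d.modify (edge.1, edge.2.1) [] (· ++ [edge.2.2])) db).items.map
        (fun p => (p.1, PySem.Str.join " |\n " p.2)) ∧
    (∀ p ∈ (l.foldl (fun d edge => d.modify (edge.1, edge.2.1) [] (· ++ [edge.2.2])) db).items, p.2 ≠ []) := by
  induction l with
  | nil => intro da db hrel hne; exact ⟨hrel, hne⟩
  | cons e t ih =>
    intro da db hrel hne
    simp only [List.foldl_cons]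
    set k : String × String := (e.1, e.2.1) with hk
    have hcont : da.contains k = db.contains k := contains_map_val _ db da hrel k
    by_cases hc : db.contains k = true
    · -- key already present: both update in place
      obtain ⟨vs, hvs⟩ : ∃ vs, db.get? k = some vs := by
        have := PySem.Dict.contains_eq_isSome_get? (d := db) (k := k)
        rw [hc] at this
        cases hg : db.get? k with
        | none => rw [hg] at this; simp at this
        | some vs => exact ⟨vs, rfl⟩
      have hvne : vs ≠ [] := hne (k, vs) (PySem.Dict.mem_items_of_get?_eq_some db hvs)
      have hgetA : da.getD k "" = PySem.Str.join " |\n " vs := by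
        rw [PySem.Dict.getD_eq_get?_getD, get?_map_val _ db da hrel k, hvs]; rfl
      have hgetB : db.getD k [] = vs := by rw [PySem.Dict.getD_eq_get?_getD, hvs]; rfl
      have hstepA : (if da.contains k then
            da.insert k (da.getD k "" ++ " |\n " ++ e.2.2) else da.insert k e.2.2) =
          da.insert k (PySem.Str.join " |\n " (vs ++ [e.2.2])) := by
        rw [hcont, hc, if_pos rfl, hgetA, str_join_append_singleton _ _ _ hvne]
      have hstepB : db.modify k [] (· ++ [e.2.2]) = db.insert k (vs ++ [e.2.2]) := by
        simp [PySem.Dict.modify, hgetB]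
      refine ih _ _ ?_ ?_
      · rw [hstepA, hstepB,
          PySem.Dict.items_insert_of_contains _ _ hc,
          PySem.Dict.items_insert_of_contains _ _ (by rw [hcont]; exact hc),
          hrel, List.map_map, List.map_map]
        refine List.map_congr_left (fun p _ => ?_)
        by_cases hpk : (p.1 == k) = true
        · simp [Function.comp, hpk]
        · simp [Function.comp, hpk]
      · rw [hstepB]
        intro p hp
        rcases (PySem.Dict.mem_items_insert db _ _ p).1 hp with h1 | h2
        · rw [h1]; simp
        · exact hne _ h2.1
    · -- fresh key: both append
      have hcf : db.contains k = false := by simpa using hc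
      have hstepB : db.modify k [] (· ++ [e.2.2]) = db.insert k [e.2.2] := by
        simp [PySem.Dict.modify, PySem.Dict.getD_of_not_contains db ([] : List String) hcf]
      refine ih _ _ ?_ ?_
      · rw [hcont, hcf]
        simp only [Bool.false_eq_true, if_false]
        rw [hstepB,
          PySem.Dict.items_insert_of_not_contains _ _ (by rw [hcont]; exact hcf),
          PySem.Dict.items_insert_of_not_contains _ _ hcf,
          hrel, List.map_append]
        simp [str_join_singleton]
      · rw [hstepB]
        intro p hp
        rcases (PySem.Dict.mem_items_insert db _ _ p).1 hp with h1 | h2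
        · rw [h1]; simp
        · exact hne _ h2.1

-- ===== VERDICT (by name: the statement is the Claim_ definition above) =====
theorem process_edge_labels_spec : Claim_equal_process_edge_labels := by
  intro edge_labels _
  unfold Spec_process_edge_labels
  have h := loop_rel edge_labels PySem.Dict.empty PySem.Dict.empty (by rfl) (by intro p hp; simp [PySem.Dict.empty] at hp)
  show (edge_labels.foldl (fun acc edge =>
      let n0 := edge.1
      let n1 := edge.2.1
      if acc.contains (n0, n1) then
        acc.insert (n0, n1) (acc.getD (n0, n1) "" ++ " |\n " ++ edge.2.2)
      else
        acc.insert (n0, n1) edge.2.2) PySem.Dict.empty).items.map (fun p => (p.1.1, p.1.2, p.2)) =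
    (edge_labels.foldl (fun d edge => d.modify (edge.1, edge.2.1) [] (· ++ [edge.2.2])) PySem.Dict.empty).items.map
      (fun p => (p.1.1, p.1.2, PySem.Str.join " |\n " p.2))
  rw [h.1, List.map_map]
  rfl
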